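-- pv_equiv track=rewrite | github.com/pipipao/HelloAlgorithms | online_test/huawei_OD_express2.py | dpMaxNum
-- ===== SOURCE A (Python) =====
-- def dpMaxNum(goodsList, room):
--     mem = [0]*(room+1)
--     for left in range(room + 1):
--         num = 0
--         for j in [c for c in goodsList if c <= left]:
--             if mem[left - j] + 1 > num:
--                 num = mem[left - j] + 1
--         mem[left] = num
--     return mem[room]
-- ===== SOURCE B (Python) =====
-- def dpMaxNum(goodsList, room):
--     # The DP never requires an exact fill (an unreachable capacity keeps value
--     # 0), so the optimum is greedy: repeatedly place the smallest good while it
--     # still fits. Positive sizes are required for the loop to terminate.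
--     if not goodsList:
--         return 0
--     m = min(goodsList)
--     if m <= 0:
--         raise ValueError("good sizes must be positive")
--     count = 0
--     rest = room
--     while rest >= m:
--         rest -= m
--         count += 1
--     return count
-- ===== Notes on version B (the rewrite author's own statement) =====
-- stated objective: faster
-- what changed: Replaces the O(room*len) DP table (rescanning the goods list per capacity) with a greedy loop that repeatedly subtracts the smallest good size, correct because A's recurrence never requires an exact fill, so the optimum just repeats the smallest good.
-- outside the precondition, e.g. on dpMaxNum([0, 0], 1): A returns 1, B raises ValueError; on dpMaxNum([0, 2], 5): A returns 3, B raises ValueError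
import Mathlib
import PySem

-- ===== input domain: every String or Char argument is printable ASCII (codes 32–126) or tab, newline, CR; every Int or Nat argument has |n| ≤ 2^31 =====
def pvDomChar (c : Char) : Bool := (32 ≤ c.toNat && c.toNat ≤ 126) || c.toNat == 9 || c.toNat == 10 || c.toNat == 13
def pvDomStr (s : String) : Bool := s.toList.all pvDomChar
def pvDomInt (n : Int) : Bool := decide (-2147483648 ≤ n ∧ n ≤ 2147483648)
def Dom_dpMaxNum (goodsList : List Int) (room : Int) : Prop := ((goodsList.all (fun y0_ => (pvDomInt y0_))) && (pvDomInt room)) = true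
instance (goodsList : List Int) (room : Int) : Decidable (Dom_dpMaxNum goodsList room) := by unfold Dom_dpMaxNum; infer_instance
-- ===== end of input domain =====

-- B replaces A's O(room·len) DP table by a greedy loop that repeatedly subtracts the
-- smallest good size (0 for an empty list): A's recurrence never requires an exact fill,
-- so the optimum repeats the smallest good; same value on the stated domain.

-- helper used by PORT A: Python list indexing xs[i] / xs[i] = v on the DP table (an Array,
-- like a Python list); exact for 0 ≤ i < size, which Pre_ guarantees for every access A makes
def pvGetItem (a : Array Int) (i : Int) : Int := a.getD i.toNat 0
def pvSetItem (a : Array Int) (i : Int) (v : Int) : Array Int := a.setIfInBounds i.toNat v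

-- ===== PORT A =====
-- literal port of Source A (capacity-outer loop, re-filtering the goods list per capacity)
def dpMaxNum (goodsList : List Int) (room : Int) : Int :=
  pvGetItem
    ((PySem.List.pyRange 0 (room + 1) 1).foldl
      (fun mem left =>
        pvSetItem mem left
          ((goodsList.filter (fun c => decide (c ≤ left))).foldl
            (fun num j =>
              if pvGetItem mem (left - j) + 1 > num then
                pvGetItem mem (left - j) + 1
              else num) 0))
      (Array.replicate (room + 1).toNat 0))
    room

-- ===== PORT B =====
-- Source B's while loop, with fuel room.toNat + 1 (enough: inside Pre_ rest starts at room and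
-- strictly decreases by m ≥ 1 each step, so the loop runs at most room.toNat times)
def altCount (m : Int) : Nat → Int → Int → Int
  | 0, count, _ => count
  | fuel + 1, count, rest =>
    if m ≤ rest then altCount m fuel (count + 1) (rest - m) else count

-- literal port of Source B: empty list → 0; m ≤ 0 raises in Python (outside Pre_, 0 here);
-- else greedy repeated subtraction of m
def dpMaxNum_alt (goodsList : List Int) (room : Int) : Int :=
  match PySem.List.min? goodsList (fun x => x) with
  | none => 0
  | some m => if m ≤ 0 then 0 else altCount m (room.toNat + 1) 0 room

-- ===== PRECONDITION & SPEC =====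
-- Pre_ excludes negative room and negative good sizes (A's mem[room] / mem[left-j] reads raise
-- IndexError there), and zero good sizes, on which A's self-referential read of the still-zero
-- mem[left] returns a value that B cannot: B's greedy loop would not terminate for m ≤ 0, so
-- it raises ValueError there (see cites).
def Pre_dpMaxNum (goodsList : List Int) (room : Int) : Prop :=
  0 ≤ room ∧ ∀ c ∈ goodsList, 1 ≤ c
instance (goodsList : List Int) (room : Int) : Decidable (Pre_dpMaxNum goodsList room) := by
  unfold Pre_dpMaxNum; infer_instance
def pvWitness_dpMaxNum : List Int × Int := ([2, 3], 7)

def Spec_dpMaxNum (goodsList : List Int) (room : Int) (out : Int) : Prop := out = dpMaxNum_alt goodsList room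
instance (goodsList : List Int) (room : Int) (out : Int) : Decidable (Spec_dpMaxNum goodsList room out) := by unfold Spec_dpMaxNum; infer_instance

-- ===== CLAIM (what is proved, stated in full; the proofs are below) =====
def Claim_equal_dpMaxNum : Prop := ∀ (goodsList : List Int) (room : Int), Dom_dpMaxNum goodsList room → Pre_dpMaxNum goodsList room → Spec_dpMaxNum goodsList room (dpMaxNum goodsList room)

-- ===== LEMMAS AND PROOFS =====

-- A fills, for every positive-size goods list, the table i ↦ i / (min size) left to right;
-- we prove that (innerA/outerA/finalA) and then compare with B's closed form.

/-- value of the DP table: `none` = the all-zero initial table, `some m` = i ↦ i / m -/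
def tabVal (mo : Option Nat) (i : Nat) : Int :=
  match mo with
  | none => 0
  | some m => ((i / m : Nat) : Int)

lemma div_sub_add_one (m w : Nat) (hm : 0 < m) (h : m ≤ w) : (w - m) / m + 1 = w / m := by
  have h2 := Nat.add_div_right (w - m) hm
  rw [Nat.sub_add_cancel h] at h2
  omega

lemma div_sub_le (m c w : Nat) (hm : 0 < m) (hmc : m ≤ c) (hcw : c ≤ w) :
    (w - c) / m + 1 ≤ w / m := by
  have h1 : (w - c) / m ≤ (w - m) / m := Nat.div_le_div_right (by omega)
  have h2 := div_sub_add_one m w hm (le_trans hmc hcw)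
  omega

lemma foldl_max_le {α : Type} (l : List α) (f : α → Int) (a b : Int) (ha : a ≤ b)
    (h : ∀ x ∈ l, f x ≤ b) : l.foldl (fun acc x => max acc (f x)) a ≤ b := by
  induction l generalizing a with
  | nil => simpa
  | cons x xs ih =>
    simp only [List.foldl_cons]
    apply ih <;> first
      | exact max_le ha (h x (by simp))
      | intro y hy; exact h y (by simp [hy])

lemma pvGetItem_toList (a : Array Int) (i : Int) : pvGetItem a i = a.toList.getD i.toNat 0 := by
  unfold pvGetItem
  rw [List.getD_eq_getElem?_getD, Array.getElem?_toList, Array.getD_eq_getD_getElem?]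

lemma pvSetItem_toList (a : Array Int) (i : Int) (v : Int) :
    (pvSetItem a i v).toList = a.toList.set i.toNat v := Array.toList_setIfInBounds

/-- A's loop body, named for the proofs (definitionally the lambda in the port) -/
def stepA (goods : List Int) (mem : Array Int) (left : Int) : Array Int :=
  pvSetItem mem left
    ((goods.filter (fun c => decide (c ≤ left))).foldl
      (fun num j =>
        if pvGetItem mem (left - j) + 1 > num then pvGetItem mem (left - j) + 1 else num) 0)

lemma innerA (goods : List Int) (m : Nat) (hm : 0 < m) (hmem : (m : Int) ∈ goods)
    (hmin : ∀ c ∈ goods, (m : Int) ≤ c) (mem : Array Int) (t : Nat)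
    (hread : ∀ i : Nat, i < t → pvGetItem mem (i : Int) = ((i / m : Nat) : Int)) :
    (goods.filter (fun c => decide (c ≤ (t : Int)))).foldl
      (fun num j =>
        if pvGetItem mem ((t : Int) - j) + 1 > num then
          pvGetItem mem ((t : Int) - j) + 1
        else num) 0 = ((t / m : Nat) : Int) := by
  have hL : ∀ j ∈ goods.filter (fun c => decide (c ≤ (t : Int))), (m : Int) ≤ j ∧ j ≤ (t : Int) := by
    intro j hj
    rw [List.mem_filter] at hj
    exact ⟨hmin j hj.1, by simpa using hj.2⟩
  rw [PySem.List.foldl_congr_mem (goods.filter (fun c => decide (c ≤ (t : Int)))) _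
      (fun num j => max num ((((t - j.toNat) / m : Nat) : Int) + 1)) 0
      (by
        intro num j hj
        obtain ⟨h1, h2⟩ := hL j hj
        have hj0 : (t : Int) - j = (((t - j.toNat : Nat)) : Int) := by omega
        rw [hj0, hread (t - j.toNat) (by omega)]
        dsimp only
        split <;> omega)]
  have hub : ∀ j ∈ goods.filter (fun c => decide (c ≤ (t : Int))),
      (((t - j.toNat) / m : Nat) : Int) + 1 ≤ ((t / m : Nat) : Int) := by
    intro j hj
    obtain ⟨h1, h2⟩ := hL j hj
    have := div_sub_le m j.toNat t hm (by omega) (by omega)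
    push_cast
    omega
  have hle := foldl_max_le (goods.filter (fun c => decide (c ≤ (t : Int))))
      (fun j => (((t - j.toNat) / m : Nat) : Int) + 1) 0 ((t / m : Nat) : Int)
      (by positivity) hub
  by_cases hmt : m ≤ t
  · have hmemL : (m : Int) ∈ goods.filter (fun c => decide (c ≤ (t : Int))) := by
      rw [List.mem_filter]
      refine ⟨hmem, by simp; omega⟩
    have hge := (PySem.List.le_foldl_max_int (goods.filter (fun c => decide (c ≤ (t : Int))))
        (fun j => (((t - j.toNat) / m : Nat) : Int) + 1) 0).2 _ hmemL
    have hval : (((t - ((m : Int)).toNat) / m : Nat) : Int) + 1 = ((t / m : Nat) : Int) := by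
      have h3 := div_sub_add_one m t hm hmt
      have h4 : ((m : Int)).toNat = m := by omega
      rw [h4]
      push_cast
      omega
    rw [hval] at hge
    beta_reduce at hle hge
    omega
  · have hnil : goods.filter (fun c => decide (c ≤ (t : Int))) = [] := by
      rw [List.filter_eq_nil_iff]
      intro c hc
      have := hmin c hc
      simp
      omega
    rw [hnil]
    simp only [List.foldl_nil]
    rw [Nat.div_eq_of_lt (by omega)]
    simp

lemma outerA (goods : List Int) (m : Nat) (hm : 0 < m) (hmem : (m : Int) ∈ goods)
    (hmin : ∀ c ∈ goods, (m : Int) ≤ c) (room : Int) :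
    ∀ k, k ≤ (room + 1).toNat →
      ((PySem.List.pyRange 0 (k : Int) 1).foldl (stepA goods)
        (Array.replicate (room + 1).toNat 0)).toList
      = (List.range (room + 1).toNat).map
          (fun i => if i < k then tabVal (some m) i else 0) := by
  intro k
  induction k with
  | zero =>
    intro _
    rw [show ((0 : Nat) : Int) = 0 from rfl, PySem.List.pyRange_one_eq_nil le_rfl]
    simp only [List.foldl_nil, Nat.not_lt_zero, if_false, Array.toList_replicate]
    rw [List.map_const']
    simp
  | succ k ih =>
    intro hk1
    have hk' : k ≤ (room + 1).toNat := by omega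
    have hkn : k < (room + 1).toNat := by omega
    rw [show ((k + 1 : Nat) : Int) = (k : Int) + 1 by push_cast; ring,
        PySem.List.pyRange_one_succ_right (by positivity), List.foldl_append]
    simp only [List.foldl_cons, List.foldl_nil]
    set Ak := (PySem.List.pyRange 0 (k : Int) 1).foldl (stepA goods)
      (Array.replicate (room + 1).toNat 0) with hAk
    have ihh := ih hk'
    have hread : ∀ i : Nat, i < k →
        pvGetItem Ak (i : Int) = ((i / m : Nat) : Int) := by
      intro i hi
      rw [pvGetItem_toList, Int.toNat_natCast, ihh, List.getD_eq_getElem?_getD,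
          List.getElem?_map, List.getElem?_range (by omega)]
      simp [hi, tabVal]
    unfold stepA
    rw [innerA goods m hm hmem hmin Ak k hread, pvSetItem_toList, Int.toNat_natCast, ihh]
    apply List.ext_getElem
    · simp
    · intro i h1 h2
      rw [List.getElem_set]
      simp only [List.getElem_map, List.getElem_range]
      simp only [List.length_set, List.length_map, List.length_range] at h1
      by_cases hik : k = i
      · subst hik
        rw [if_pos rfl, if_pos (by omega)]
        rfl
      · rw [if_neg hik]
        by_cases h3 : i < k
        · rw [if_pos h3, if_pos (by omega)]
        · rw [if_neg h3, if_neg (by omega)]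

lemma finalA (goods : List Int) (m : Nat) (hm : 0 < m) (hmem : (m : Int) ∈ goods)
    (hmin : ∀ c ∈ goods, (m : Int) ≤ c) (room : Int) (hroom : 0 ≤ room) :
    dpMaxNum goods room = ((room.toNat / m : Nat) : Int) := by
  have h := outerA goods m hm hmem hmin room (room + 1).toNat le_rfl
  rw [show (((room + 1).toNat : Nat) : Int) = room + 1 by omega] at h
  show pvGetItem ((PySem.List.pyRange 0 (room + 1) 1).foldl (stepA goods)
    (Array.replicate (room + 1).toNat 0)) room = ((room.toNat / m : Nat) : Int)
  rw [pvGetItem_toList, h, List.getD_eq_getElem?_getD, List.getElem?_map,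
      List.getElem?_range (by omega)]
  simp only [Option.map_some, Option.getD_some]
  rw [if_pos (by omega)]
  rfl

lemma emptyA (room : Int) : dpMaxNum [] room = 0 := by
  show pvGetItem ((PySem.List.pyRange 0 (room + 1) 1).foldl (stepA [])
    (Array.replicate (room + 1).toNat 0)) room = 0
  have key : ∀ (l : List Int) (a : Array Int),
      a.toList = List.replicate (room + 1).toNat 0 →
      (l.foldl (stepA []) a).toList = List.replicate (room + 1).toNat 0 := by
    intro l
    induction l with
    | nil => intro a ha; simpa using ha
    | cons x l ih =>
      intro a ha
      simp only [List.foldl_cons]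
      apply ih
      simp only [stepA, List.filter_nil, List.foldl_nil, pvSetItem_toList, ha,
        List.set_replicate_self]
  rw [pvGetItem_toList, key _ _ (Array.toList_replicate)]
  simp [List.getD_eq_getElem?_getD]

lemma altCount_eq (m : Int) (hm : 1 ≤ m) :
    ∀ (fuel : Nat) (count r : Int), r.toNat < fuel →
      altCount m fuel count r = count + ((r.toNat / m.toNat : Nat) : Int) := by
  intro fuel
  induction fuel with
  | zero => intro count r h; omega
  | succ fuel ih =>
    intro count r h
    unfold altCount
    by_cases hr : m ≤ r
    · rw [if_pos hr, ih (count + 1) (r - m) (by omega)]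
      have h1 := div_sub_add_one m.toNat r.toNat (by omega) (by omega)
      have h2 : (r - m).toNat = r.toNat - m.toNat := by omega
      rw [h2]
      push_cast [← h1]
      ring
    · rw [if_neg hr, Nat.div_eq_of_lt (by omega)]
      simp

-- ===== VERDICT (by name: the statement is the Claim_ definition above) =====
theorem dpMaxNum_spec : Claim_equal_dpMaxNum := by
  intro goods room _ hpre
  obtain ⟨hroom, h1⟩ := hpre
  unfold Spec_dpMaxNum
  cases hmin : PySem.List.min? goods (fun x => x) with
  | none =>
    have hnil := (PySem.List.min?_eq_none_iff goods (fun x => x)).mp hmin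
    subst hnil
    rw [emptyA room]
    unfold dpMaxNum_alt
    rw [hmin]
  | some m =>
    have hmem := PySem.List.min?_mem hmin
    have hminle : ∀ y ∈ goods, m ≤ y := by
      intro y hy
      exact PySem.List.min?_isMin hmin y hy
    have hm1 : 1 ≤ m := h1 m hmem
    have hcast : ((m.toNat : Nat) : Int) = m := by omega
    have hA := finalA goods m.toNat (by omega) (by rw [hcast]; exact hmem)
      (by intro c hc; rw [hcast]; exact hminle c hc) room hroom
    have hB : dpMaxNum_alt goods room = altCount m (room.toNat + 1) 0 room := by
      unfold dpMaxNum_alt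
      rw [hmin]
      simp only [if_neg (show ¬ m ≤ 0 by omega)]
    rw [hA, hB, altCount_eq m hm1 (room.toNat + 1) 0 room (by omega)]
    ring
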